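-- pv_equiv track=rewrite | github.com/stef4k/Algorithms-and-data-structures-assignments | assignment-1/k_cores.py | indexfind
-- ===== SOURCE A (Python) =====
-- def get_data(pq, p):
--     return pq[p]
--
-- def children(pq, p):
--     if 2*p + 2 < len(pq):
--         return [2*p + 1, 2*p + 2]
--     else:
--         return [2*p + 1]
--
-- def has_children(pq, p):
--     return 2*p + 1 < len(pq)
--
-- def indexfind(pq,pair,ind):
--     if get_data(pq,ind)==pair:#if @pair is the same as the containing of this exact element
--         return ind #end function and return the index of this branch
--     elif get_data(pq,ind)[0]<=pair[0] and has_children(pq,ind):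
--         #if value of pair is greater than or equl examined element
--         #and the  element has children
--             kids=children(pq,ind) #assign @kids as the result of function children() #not needed
--             for u in kids: # for every element in the list kids #for u in children(pq,ind)
--                 indInKids=indexfind(pq,pair,u) #examine the child,by recursion
--                 if indInKids is not None: #if the value of indInKids is not null
--                  return indInKids #return it and end function
-- ===== SOURCE B (Python) =====
-- def indexfind(pq, pair, ind):
--     # Iterative pre-order DFS with an explicit stack instead of recursion.
--     stack = [ind]
--     while stack:
--         node = stack.pop()
--         if pq[node] == pair:
--             return node
--         if pq[node][0] <= pair[0] and 2*node + 1 < len(pq):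
--             if 2*node + 2 < len(pq):
--                 stack.append(2*node + 2)
--             stack.append(2*node + 1)
--     return None
-- ===== Notes on version B (the rewrite author's own statement) =====
-- stated objective: alternative
-- what changed: The recursive left-to-right DFS over the heap is replaced by an iterative loop with an explicit stack (right child pushed before left to preserve pre-order).
-- outside the precondition, e.g. on indexfind([(1, 2)], (1, 2), -1): A returns -1, B returns -1; on indexfind([(1, 2), (3, 4)], (9, 9), 5): A raises IndexError, B raises IndexError
import Mathlib
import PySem

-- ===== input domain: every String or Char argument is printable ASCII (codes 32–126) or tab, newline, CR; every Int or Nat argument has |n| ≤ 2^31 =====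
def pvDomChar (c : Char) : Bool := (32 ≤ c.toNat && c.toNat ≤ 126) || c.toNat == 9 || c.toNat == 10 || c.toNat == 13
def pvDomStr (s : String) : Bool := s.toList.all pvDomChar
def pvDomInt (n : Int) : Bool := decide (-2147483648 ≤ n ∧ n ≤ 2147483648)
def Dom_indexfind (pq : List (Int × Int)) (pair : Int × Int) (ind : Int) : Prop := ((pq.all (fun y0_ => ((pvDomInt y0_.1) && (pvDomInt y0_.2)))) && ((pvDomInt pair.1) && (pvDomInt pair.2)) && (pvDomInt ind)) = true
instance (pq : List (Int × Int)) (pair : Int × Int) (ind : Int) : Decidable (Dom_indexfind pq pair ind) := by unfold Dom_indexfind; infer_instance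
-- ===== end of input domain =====

-- B replaces A's recursive DFS by an iterative explicit-stack loop (right child pushed
-- before left to keep A's pre-order): a different decomposition, same cost.

-- ===== PORT A =====
-- get_data(pq, p) = pq[p]  (Option: none = IndexError)
def getData (pq : List (Int × Int)) (p : Int) : Option (Int × Int) :=
  PySem.List.pyGet? pq p

-- children(pq, p)
def childrenIdx (pq : List (Int × Int)) (p : Int) : List Int :=
  if 2*p + 2 < (pq.length : Int) then [2*p + 1, 2*p + 2] else [2*p + 1]

-- has_children(pq, p)
def hasChildren (pq : List (Int × Int)) (p : Int) : Bool :=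
  decide (2*p + 1 < (pq.length : Int))

-- A's recursion, fueled: Python's recursion does not terminate for negative start
-- indices (excluded by Pre_), so the Lean port carries a fuel counter that is never
-- exhausted on any input admitted by Pre_ (proved via AFuel_irrel below).
def indexfindFuel : Nat → List (Int × Int) → (Int × Int) → Int → Option Int
  | 0, _, _, _ => none
  | f+1, pq, pair, ind =>
    match getData pq ind with
    | none => none        -- IndexError: outside Pre_
    | some v =>
      if v = pair then some ind
      else if v.1 ≤ pair.1 ∧ hasChildren pq ind = true then
        -- for u in kids: if recursive result is not None, return it; else fall through to None
        (childrenIdx pq ind).findSome? (fun u => indexfindFuel f pq pair u)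
      else none

def indexfind (pq : List (Int × Int)) (pair : Int × Int) (ind : Int) : Option Int :=
  indexfindFuel (pq.length + 1) pq pair ind

-- ===== PORT B =====
-- while stack: pop a node; return it on a match; otherwise push right child then left
-- child (so the left is explored first) when pq[node][0] <= pair[0] and children exist.
-- Fueled for the same reason as A's port; 2^len bounds the number of pops on every
-- input admitted by Pre_ (proved via subtreeSize_le_pow below).
def indexfindAltLoop : Nat → List (Int × Int) → (Int × Int) → List Int → Option Int
  | 0, _, _, _ => none
  | _+1, _, _, [] => none
  | f+1, pq, pair, node :: stack =>
    match PySem.List.pyGet? pq node with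
    | none => none        -- IndexError: outside Pre_
    | some v =>
      if v = pair then some node
      else if v.1 ≤ pair.1 ∧ 2*node + 1 < (pq.length : Int) then
        indexfindAltLoop f pq pair
          ((2*node + 1) :: (if 2*node + 2 < (pq.length : Int) then (2*node + 2) :: stack else stack))
      else indexfindAltLoop f pq pair stack

def indexfind_alt (pq : List (Int × Int)) (pair : Int × Int) (ind : Int) : Option Int :=
  indexfindAltLoop (2 ^ pq.length) pq pair [ind]

-- ===== PRECONDITION & SPEC =====
-- Pre_ restricts to in-range non-negative start indices, the heap's natural domain:
-- out-of-range ind raises IndexError, negative ind wraps around and in general recurses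
-- without bound (RecursionError); the rare returning negative-ind cases are
-- negative-index wraparound artefacts outside that natural domain.
def Pre_indexfind (pq : List (Int × Int)) (_pair : Int × Int) (ind : Int) : Prop :=
  0 ≤ ind ∧ ind < (pq.length : Int)
instance (pq : List (Int × Int)) (pair : Int × Int) (ind : Int) : Decidable (Pre_indexfind pq pair ind) := by unfold Pre_indexfind; infer_instance

def pvWitness_indexfind : (List (Int × Int)) × (Int × Int) × Int := ([(1, 2), (3, 4), (5, 6)], (3, 4), 0)

def Spec_indexfind (pq : List (Int × Int)) (pair : Int × Int) (ind : Int) (out : Option Int) : Prop := out = indexfind_alt pq pair ind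
instance (pq : List (Int × Int)) (pair : Int × Int) (ind : Int) (out : Option Int) : Decidable (Spec_indexfind pq pair ind out) := by unfold Spec_indexfind; infer_instance

-- ===== CLAIM (what is proved, stated in full; the proofs are below) =====
def Claim_equal_indexfind : Prop := ∀ (pq : List (Int × Int)) (pair : Int × Int) (ind : Int), Dom_indexfind pq pair ind → Pre_indexfind pq pair ind → Spec_indexfind pq pair ind (indexfind pq pair ind)

-- ===== LEMMAS AND PROOFS =====

-- number of nodes of the heap subtree rooted at n (n a Nat index, len the array length)
def subtreeSize (len n : Nat) : Nat :=
  if h : 2*n + 1 < len then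
    1 + subtreeSize len (2*n + 1) + (if 2*n + 2 < len then subtreeSize len (2*n + 2) else 0)
  else 1
termination_by len - n
decreasing_by all_goals omega

lemma subtreeSize_pos (len n : Nat) : 1 ≤ subtreeSize len n := by
  unfold subtreeSize; split_ifs <;> omega

lemma subtreeSize_le_pow_aux (len : Nat) : ∀ k n, len - n ≤ k → subtreeSize len n ≤ 2 ^ (len - n) := by
  intro k
  induction k with
  | zero =>
    intro n h
    unfold subtreeSize
    rw [dif_neg (by omega)]
    exact Nat.one_le_two_pow
  | succ k IH =>
    intro n h
    unfold subtreeSize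
    split_ifs with h1 h2
    · have a1 := IH (2*n+1) (by omega)
      have a2 := IH (2*n+2) (by omega)
      have m1 : (2:Nat)^(len-(2*n+1)) ≤ 2^(len-n-1) := Nat.pow_le_pow_right (by omega) (by omega)
      have m2 : (2:Nat)^(len-(2*n+2)) ≤ 2^(len-n-2) := Nat.pow_le_pow_right (by omega) (by omega)
      have hp : 1 ≤ (2:Nat)^(len-n-2) := Nat.one_le_two_pow
      have E1 : (2:Nat)^(len-n) = 2^(len-n-2)*2*2 := by
        rw [← Nat.pow_succ, ← Nat.pow_succ]; congr 1; omega
      have E2 : (2:Nat)^(len-n-1) = 2^(len-n-2)*2 := by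
        rw [← Nat.pow_succ]; congr 1; omega
      omega
    · have a1 := IH (2*n+1) (by omega)
      have m1 : (2:Nat)^(len-(2*n+1)) ≤ 2^(len-n-1) := Nat.pow_le_pow_right (by omega) (by omega)
      have hp : 1 ≤ (2:Nat)^(len-n-1) := Nat.one_le_two_pow
      have E2 : (2:Nat)^(len-n) = 2^(len-n-1)*2 := by
        rw [← Nat.pow_succ]; congr 1; omega
      omega
    · exact Nat.one_le_two_pow

lemma subtreeSize_le_pow (len : Nat) : ∀ n, subtreeSize len n ≤ 2 ^ (len - n) :=
  fun n => subtreeSize_le_pow_aux len (len - n) n le_rfl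

lemma AFuel_irrel (pq : List (Int × Int)) (pair : Int × Int) :
    ∀ f g : Nat, ∀ ind : Int, 0 ≤ ind → ind < (pq.length : Int) →
      pq.length - ind.toNat ≤ f → pq.length - ind.toNat ≤ g →
      indexfindFuel f pq pair ind = indexfindFuel g pq pair ind := by
  intro f
  induction f using Nat.strong_induction_on with
  | _ f IH =>
    intro g ind h0 h1 hf hg
    have hlt : ind.toNat < pq.length := by omega
    obtain ⟨f', rfl⟩ : ∃ f', f = f'+1 := ⟨f-1, by omega⟩
    obtain ⟨g', rfl⟩ : ∃ g', g = g'+1 := ⟨g-1, by omega⟩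
    have hget : getData pq ind = some pq[ind.toNat] := by
      simpa [getData] using PySem.List.pyGet?_eq_some_getElem pq h0 h1
    simp only [indexfindFuel, hget]
    split_ifs with hm hc
    · rfl
    · have hch : 2*ind + 1 < (pq.length : Int) := by
        have := hc.2
        simpa [hasChildren] using this
      have e1 : indexfindFuel f' pq pair (2*ind+1) = indexfindFuel g' pq pair (2*ind+1) :=
        IH f' (by omega) g' (2*ind+1) (by omega) hch (by omega) (by omega)
      unfold childrenIdx
      split_ifs with h2
      · have e2 : indexfindFuel f' pq pair (2*ind+2) = indexfindFuel g' pq pair (2*ind+2) :=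
          IH f' (by omega) g' (2*ind+2) (by omega) h2 (by omega) (by omega)
        simp [List.findSome?, e1, e2]
      · simp [List.findSome?, e1]
    · rfl

-- one unfolding of port A at a valid index
lemma indexfind_unfold (pq : List (Int × Int)) (pair : Int × Int) (node : Int)
    (h0 : 0 ≤ node) (h1 : node < (pq.length : Int)) :
    indexfind pq pair node =
      if pq[node.toNat]'(by omega) = pair then some node
      else if (pq[node.toNat]'(by omega)).1 ≤ pair.1 ∧ 2*node + 1 < (pq.length : Int) then
        (childrenIdx pq node).findSome? (fun u => indexfind pq pair u)
      else none := by
  have hget : getData pq node = some pq[node.toNat] := by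
    simpa [getData] using PySem.List.pyGet?_eq_some_getElem pq h0 h1
  conv_lhs => rw [show indexfind pq pair node = indexfindFuel (pq.length+1) pq pair node from rfl]
  simp only [indexfindFuel, hget, hasChildren, decide_eq_true_eq]
  split_ifs with hm hc
  · rfl
  · have e1 : indexfindFuel pq.length pq pair (2*node+1) = indexfind pq pair (2*node+1) :=
      AFuel_irrel pq pair pq.length (pq.length+1) (2*node+1) (by omega) hc.2 (by omega) (by omega)
    unfold childrenIdx
    split_ifs with h2
    · have e2 : indexfindFuel pq.length pq pair (2*node+2) = indexfind pq pair (2*node+2) :=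
        AFuel_irrel pq pair pq.length (pq.length+1) (2*node+2) (by omega) h2 (by omega) (by omega)
      simp [List.findSome?, e1, e2]
    · simp [List.findSome?, e1]
  · rfl

-- A applied to the stack entries in order, first hit wins
def chainA (pq : List (Int × Int)) (pair : Int × Int) : List Int → Option Int
  | [] => none
  | n :: rest =>
    match indexfind pq pair n with
    | some r => some r
    | none => chainA pq pair rest

def stackNeed (len : Nat) : List Int → Nat
  | [] => 0
  | n :: rest => subtreeSize len n.toNat + stackNeed len rest

lemma alt_chain (pq : List (Int × Int)) (pair : Int × Int) :
    ∀ f : Nat, ∀ stack : List Int,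
      (∀ n ∈ stack, 0 ≤ n ∧ n < (pq.length : Int)) →
      stackNeed pq.length stack ≤ f →
      indexfindAltLoop f pq pair stack = chainA pq pair stack := by
  intro f
  induction f using Nat.strong_induction_on with
  | _ f IH =>
    intro stack hv hn
    cases stack with
    | nil => cases f <;> simp [indexfindAltLoop, chainA]
    | cons node rest =>
      obtain ⟨h0, h1⟩ := hv node (List.mem_cons_self ..)
      have hlt : node.toNat < pq.length := by omega
      have hpos := subtreeSize_pos pq.length node.toNat
      have hge1 : 1 ≤ f := by simp [stackNeed] at hn; omega
      obtain ⟨f', rfl⟩ : ∃ f', f = f'+1 := ⟨f-1, by omega⟩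
      have hget : PySem.List.pyGet? pq node = some pq[node.toNat] :=
        PySem.List.pyGet?_eq_some_getElem pq h0 h1
      have hA := indexfind_unfold pq pair node h0 h1
      have hrest : ∀ n ∈ rest, 0 ≤ n ∧ n < (pq.length : Int) := by
        intro n hmem; exact hv n (by simp [hmem])
      simp only [stackNeed] at hn
      have ht1 : (2*node+1).toNat = 2*node.toNat+1 := by omega
      have ht2 : (2*node+2).toNat = 2*node.toNat+2 := by omega
      simp only [indexfindAltLoop, hget]
      split_ifs with hm hc h2
      · simp [chainA, hA, hm]
      · -- both children pushed
        have hcl : 2*node + 1 < (pq.length : Int) := hc.2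
        have hsz : subtreeSize pq.length node.toNat =
            1 + subtreeSize pq.length (2*node.toNat+1) +
              (if 2*node.toNat+2 < pq.length then subtreeSize pq.length (2*node.toNat+2) else 0) := by
          rw [subtreeSize, dif_pos (by omega)]
        have hn2 : 2*node.toNat+2 < pq.length := by omega
        rw [hsz, if_pos hn2] at hn
        rw [IH f' (by omega) ((2*node+1) :: (2*node+2) :: rest)
          (by intro n hmem
              simp only [List.mem_cons] at hmem
              rcases hmem with rfl | rfl | hmem
              · exact ⟨by omega, hc.2⟩
              · exact ⟨by omega, h2⟩
              · exact hrest n hmem)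
          (by simp only [stackNeed, ht1, ht2]; omega)]
        cases hx1 : indexfind pq pair (2*node+1) <;>
          cases hx2 : indexfind pq pair (2*node+2) <;>
            simp [chainA, hA, hm, hc, childrenIdx, h2, List.findSome?, hx1, hx2]
      · -- only the left child exists
        have hcl : 2*node + 1 < (pq.length : Int) := hc.2
        have hsz : subtreeSize pq.length node.toNat =
            1 + subtreeSize pq.length (2*node.toNat+1) +
              (if 2*node.toNat+2 < pq.length then subtreeSize pq.length (2*node.toNat+2) else 0) := by
          rw [subtreeSize, dif_pos (by omega)]
        have hn2 : ¬ 2*node.toNat+2 < pq.length := by omega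
        rw [hsz, if_neg hn2] at hn
        rw [IH f' (by omega) ((2*node+1) :: rest)
          (by intro n hmem
              simp only [List.mem_cons] at hmem
              rcases hmem with rfl | hmem
              · exact ⟨by omega, hc.2⟩
              · exact hrest n hmem)
          (by simp only [stackNeed, ht1]; omega)]
        cases hx1 : indexfind pq pair (2*node+1) <;>
          simp [chainA, hA, hm, hc, childrenIdx, h2, List.findSome?, hx1]
      · -- no descent at this node
        rw [IH f' (by omega) rest hrest (by omega)]
        simp [chainA, hA, hm, hc]

-- ===== VERDICT (by name: the statement is the Claim_ definition above) =====
theorem indexfind_spec : Claim_equal_indexfind := by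
  intro pq pair ind _ hpre
  obtain ⟨h0, h1⟩ := hpre
  unfold Spec_indexfind indexfind_alt
  have hv : ∀ n ∈ [ind], 0 ≤ n ∧ n < (pq.length : Int) := by
    intro n hn; simp at hn; subst hn; exact ⟨h0, h1⟩
  have hneed : stackNeed pq.length [ind] ≤ 2 ^ pq.length := by
    have := subtreeSize_le_pow pq.length ind.toNat
    have h2 : (2:Nat) ^ (pq.length - ind.toNat) ≤ 2 ^ pq.length :=
      Nat.pow_le_pow_right (by omega) (by omega)
    simp [stackNeed]; omega
  rw [alt_chain pq pair _ _ hv hneed]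
  cases h : indexfind pq pair ind <;> simp [chainA, h]
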